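-- pv_equiv track=rewrite | github.com/lunerave/codetree-TILs | 241008/고대 문명 유적 탐사/ancient-ruin-exploration.py | bfs
-- ===== SOURCE A (Python) =====
-- from collections import deque
--
-- dx = [-1, 1, 0, 0]
--
-- dy = [0, 0, 1, -1]
--
-- def bfs(rotated):
--     temp = 0
--     visited = [[0]*5 for _ in range(5)]
--     for i in range(5):
--         for j in range(5):
--             if rotated[i][j] > 0 and visited[i][j] == 0:
--                 num = rotated[i][j]
--                 visited[i][j] = 1
--                 q = deque()
--                 q.append((i, j))
--                 count = 1
--
--                 while q:
--                     x, y = q.popleft()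
--
--                     for d in range(4):
--                         nx = x + dx[d]
--                         ny = y + dy[d]
--
--                         if 0 <= nx < 5 and 0 <= ny < 5 and visited[nx][ny] == 0 and rotated[nx][ny] == num:
--                             visited[nx][ny] = 1
--                             count += 1
--                             q.append((nx, ny))
--
--                 if count >= 3:
--                     temp += count
--     return temp
-- ===== SOURCE B (Python) =====
-- def bfs(rotated):
--     # Per-cell fixpoint closure instead of a shared visited array + BFS queue:
--     # count the positive cells whose same-value connected component has >= 3 cells.
--     def comp(i, j):
--         v = rotated[i][j]
--         cells = {(i, j)}
--         for _ in range(25):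
--             cells = cells | {(x + a, y + b)
--                              for (x, y) in cells
--                              for (a, b) in ((-1, 0), (1, 0), (0, 1), (0, -1))
--                              if 0 <= x + a < 5 and 0 <= y + b < 5 and rotated[x + a][y + b] == v}
--         return cells
--     return sum(1 for i in range(5) for j in range(5)
--                if rotated[i][j] > 0 and len(comp(i, j)) >= 3)
-- ===== Notes on version B (the rewrite author's own statement) =====
-- stated objective: alternative
-- what changed: Replaced the shared visited-array BFS (queue, per-component counting) by a per-cell monotone fixpoint closure: for each positive cell its same-value component is grown as a set until stable, and the result counts the positive cells whose component has >= 3 cells (equal to the sum of qualifying component sizes).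
import Mathlib
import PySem

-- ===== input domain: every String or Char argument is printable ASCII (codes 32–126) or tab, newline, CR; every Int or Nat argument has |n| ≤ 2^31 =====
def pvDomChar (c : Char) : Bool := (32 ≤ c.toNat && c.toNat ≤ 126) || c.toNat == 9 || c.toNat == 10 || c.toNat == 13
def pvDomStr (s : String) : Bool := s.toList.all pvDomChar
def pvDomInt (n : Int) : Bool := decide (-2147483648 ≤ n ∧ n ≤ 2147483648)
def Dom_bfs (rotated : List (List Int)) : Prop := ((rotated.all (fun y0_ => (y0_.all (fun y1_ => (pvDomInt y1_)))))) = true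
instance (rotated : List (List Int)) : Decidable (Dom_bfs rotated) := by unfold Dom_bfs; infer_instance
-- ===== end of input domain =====

-- B replaces A's shared-visited BFS by a per-cell fixpoint closure counting positive cells whose
-- same-value component has ≥ 3 cells; same return value, alternative algorithm (not faster).

-- shared helpers: grid access rotated[i][j] (total via default 0; Pre_bfs keeps indices in range)
def pvGrid (rotated : List (List Int)) (c : Fin 5 × Fin 5) : Int :=
  (rotated.getD c.1 []).getD c.2 0

-- in-bounds 4-neighbours of a cell, in A's direction order dx=[-1,1,0,0], dy=[0,0,1,-1]
def pvNbrs (c : Fin 5 × Fin 5) : List (Fin 5 × Fin 5) :=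
  ([(-1, 0), (1, 0), (0, 1), (0, -1)] : List (Int × Int)).filterMap (fun d =>
    let nx : Int := (c.1 : Int) + d.1
    let ny : Int := (c.2 : Int) + d.2
    if h : 0 ≤ nx ∧ nx < 5 ∧ 0 ≤ ny ∧ ny < 5 then
      some (⟨nx.toNat, by omega⟩, ⟨ny.toNat, by omega⟩)
    else none)

-- the 25 cells in row-major order (the `for i in range(5): for j in range(5)` order)
def pvCells : List (Fin 5 × Fin 5) :=
  (List.finRange 5).flatMap (fun i => (List.finRange 5).map (fun j => (i, j)))

-- ===== PORT A =====
-- inner `for d in range(4)` body: try each neighbour, mark/count/enqueue the fresh same-value ones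
def pvScan (g : Fin 5 × Fin 5 → Int) (num : Int) :
    List (Fin 5 × Fin 5) → Finset (Fin 5 × Fin 5) → Nat → List (Fin 5 × Fin 5) →
    Finset (Fin 5 × Fin 5) × Nat × List (Fin 5 × Fin 5)
  | [], V, count, q => (V, count, q)
  | n :: ns, V, count, q =>
    if n ∉ V ∧ g n = num then pvScan g num ns (insert n V) (count + 1) (q ++ [n])
    else pvScan g num ns V count q

-- termination measure for the `while q` loop (cited by pvBfsLoop's decreasing_by)
theorem pvScan_measure (g : Fin 5 × Fin 5 → Int) (num : Int) :
    ∀ (ns : List (Fin 5 × Fin 5)) (V : Finset (Fin 5 × Fin 5)) (count : Nat)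
      (q : List (Fin 5 × Fin 5)),
      2 * (Finset.univ \ (pvScan g num ns V count q).1).card +
        (pvScan g num ns V count q).2.2.length ≤
      2 * (Finset.univ \ V).card + q.length := by
  intro ns
  induction ns with
  | nil => intro V count q; simp [pvScan]
  | cons n ns ih =>
    intro V count q
    by_cases h : n ∉ V ∧ g n = num
    · have h1 := ih (insert n V) (count + 1) (q ++ [n])
      have hmem : n ∈ Finset.univ \ V := by simp [h.1]
      have hset : Finset.univ \ insert n V = (Finset.univ \ V).erase n := by
        ext x; simp [Finset.mem_erase]
      have hcard : (Finset.univ \ insert n V).card = (Finset.univ \ V).card - 1 := by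
        rw [hset, Finset.card_erase_of_mem hmem]
      have hpos : 1 ≤ (Finset.univ \ V).card := Finset.card_pos.mpr ⟨n, hmem⟩
      simp only [pvScan, if_pos h]
      simp only [hcard, List.length_append, List.length_cons, List.length_nil] at h1 ⊢
      omega
    · simpa only [pvScan, if_neg h] using ih V count q

-- the `while q:` loop
def pvBfsLoop (g : Fin 5 × Fin 5 → Int) (num : Int) (V : Finset (Fin 5 × Fin 5))
    (q : List (Fin 5 × Fin 5)) (count : Nat) : Finset (Fin 5 × Fin 5) × Nat :=
  match q with
  | [] => (V, count)
  | c :: rest =>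
    let r := pvScan g num (pvNbrs c) V count rest
    pvBfsLoop g num r.1 r.2.2 r.2.1
termination_by 2 * (Finset.univ \ V).card + q.length
decreasing_by
  have h := pvScan_measure g num (pvNbrs c) V count rest
  simp only [List.length_cons]
  omega

-- the outer double loop over the grid cells
def pvOuter (g : Fin 5 × Fin 5 → Int) :
    List (Fin 5 × Fin 5) → Finset (Fin 5 × Fin 5) → Int → Int
  | [], _, temp => temp
  | c :: cs, V, temp =>
    if 0 < g c ∧ c ∉ V then
      let r := pvBfsLoop g (g c) (insert c V) [c] 1
      pvOuter g cs r.1 (if 3 ≤ r.2 then temp + (r.2 : Int) else temp)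
    else pvOuter g cs V temp

def bfs (rotated : List (List Int)) : Int :=
  pvOuter (pvGrid rotated) pvCells ∅ 0

-- ===== PORT B =====
-- one closure round: add every in-bounds neighbour of the current set holding value v
def pvStep (g : Fin 5 × Fin 5 → Int) (v : Int) (S : Finset (Fin 5 × Fin 5)) :
    Finset (Fin 5 × Fin 5) :=
  S ∪ S.biUnion (fun a => (pvNbrs a).toFinset.filter (fun b => g b = v))

-- `comp(i, j)`: 25 closure rounds from the singleton
def pvComp (g : Fin 5 × Fin 5 → Int) (c : Fin 5 × Fin 5) : Finset (Fin 5 × Fin 5) :=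
  (pvStep g (g c))^[25] {c}

def bfs_alt (rotated : List (List Int)) : Int :=
  ((pvCells.filter (fun c =>
      decide (0 < pvGrid rotated c ∧ 3 ≤ (pvComp (pvGrid rotated) c).card))).length : Int)

-- ===== PRECONDITION & SPEC =====
-- Pre_bfs: exactly the inputs where Python A's rotated[i][j] (0 ≤ i,j < 5) never raises IndexError:
-- at least 5 rows and each of the first 5 rows has at least 5 entries.
def Pre_bfs (rotated : List (List Int)) : Prop :=
  5 ≤ rotated.length ∧ ∀ r ∈ rotated.take 5, 5 ≤ r.length
instance (rotated : List (List Int)) : Decidable (Pre_bfs rotated) := by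
  unfold Pre_bfs; infer_instance

def pvWitness_bfs : List (List Int) :=
  [[1, 1, 1, 0, 0], [0, 0, 0, 0, 0], [0, 0, 2, 2, 0], [0, 0, 2, 0, 0], [0, 0, 0, 0, 0]]

def Spec_bfs (rotated : List (List Int)) (out : Int) : Prop := out = bfs_alt rotated
instance (rotated : List (List Int)) (out : Int) : Decidable (Spec_bfs rotated out) := by
  unfold Spec_bfs; infer_instance

-- ===== CLAIM (what is proved, stated in full; the proofs are below) =====
def Claim_equal_bfs : Prop :=
  ∀ (rotated : List (List Int)), Dom_bfs rotated → Pre_bfs rotated → Spec_bfs rotated (bfs rotated)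

-- ===== LEMMAS AND PROOFS =====

theorem pv_nbrs_symm : ∀ a b : Fin 5 × Fin 5, b ∈ pvNbrs a ↔ a ∈ pvNbrs b := by decide

theorem pv_mem_cells : ∀ a : Fin 5 × Fin 5, a ∈ pvCells := by decide

-- full description of one `for d in range(4)` pass
theorem pvScan_spec (g : Fin 5 × Fin 5 → Int) (num : Int) :
    ∀ (ns : List (Fin 5 × Fin 5)) (V : Finset (Fin 5 × Fin 5)) (count : Nat)
      (q : List (Fin 5 × Fin 5)),
      (pvScan g num ns V count q).1 = V ∪ ns.toFinset.filter (fun b => g b = num) ∧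
      (pvScan g num ns V count q).2.1 = count + ((pvScan g num ns V count q).1 \ V).card ∧
      (∃ l, (pvScan g num ns V count q).2.2 = q ++ l) ∧
      (∀ x ∈ (pvScan g num ns V count q).2.2,
        x ∈ q ∨ (x ∈ ns ∧ g x = num ∧ x ∈ (pvScan g num ns V count q).1)) ∧
      (∀ x ∈ (pvScan g num ns V count q).1, x ∉ V → x ∈ (pvScan g num ns V count q).2.2) := by
  intro ns
  induction ns with
  | nil =>
    intro V count q
    refine ⟨by simp [pvScan], by simp [pvScan], ⟨[], by simp [pvScan]⟩, ?_, ?_⟩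
    · intro x hx; exact Or.inl (by simpa [pvScan] using hx)
    · intro x hx hxV; exact absurd (by simpa [pvScan] using hx) hxV
  | cons n ns ih =>
    intro V count q
    by_cases h : n ∉ V ∧ g n = num
    · obtain ⟨i1, i2, ⟨l, i3⟩, i4, i5⟩ := ih (insert n V) (count + 1) (q ++ [n])
      simp only [pvScan, if_pos h]
      have hV1 : (pvScan g num ns (insert n V) (count + 1) (q ++ [n])).1 =
          V ∪ (n :: ns).toFinset.filter (fun b => g b = num) := by
        rw [i1]; ext x
        by_cases hx : x = n <;> simp [hx, h.2, Finset.mem_filter, Finset.mem_insert]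
      have hnR : n ∈ (pvScan g num ns (insert n V) (count + 1) (q ++ [n])).1 := by
        rw [i1]; exact Finset.mem_union_left _ (Finset.mem_insert_self _ _)
      refine ⟨hV1, ?_, ⟨[n] ++ l, by rw [i3, List.append_assoc]⟩, ?_, ?_⟩
      · -- count equation
        have hsplit : (pvScan g num ns (insert n V) (count + 1) (q ++ [n])).1 \ V =
            insert n ((pvScan g num ns (insert n V) (count + 1) (q ++ [n])).1 \ insert n V) := by
          ext x
          by_cases hx : x = n <;>
            simp [hx, h.1, hnR, Finset.mem_sdiff, Finset.mem_insert]
        rw [i2, hsplit, Finset.card_insert_of_notMem (by simp)]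
        omega
      · intro x hx
        rcases i4 x hx with hq | ⟨hns, hval, hmem⟩
        · rcases List.mem_append.mp hq with hq | hq
          · exact Or.inl hq
          · right
            have hxn : x = n := by simpa using hq
            exact ⟨by simp [hxn], by rw [hxn]; exact h.2, by rw [hxn]; exact hnR⟩
        · exact Or.inr ⟨List.mem_cons_of_mem _ hns, hval, hmem⟩
      · intro x hx hxV
        by_cases hxn : x = n
        · rw [i3]; subst hxn; simp
        · exact i5 x hx (by simp [Finset.mem_insert, hxn, hxV])
    · obtain ⟨i1, i2, i3, i4, i5⟩ := ih V count q
      simp only [pvScan, if_neg h]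
      have hV1 : (pvScan g num ns V count q).1 =
          V ∪ (n :: ns).toFinset.filter (fun b => g b = num) := by
        rw [i1]; ext x
        rcases not_and_or.mp h with hn | hn
        · have hn' : n ∈ V := not_not.mp hn
          by_cases hx : x = n <;>
            simp [hx, hn', Finset.mem_filter, Finset.mem_insert]
        · by_cases hx : x = n <;>
            simp [hx, hn, Finset.mem_filter, Finset.mem_insert]
      refine ⟨hV1, by rw [i2, i1], i3, ?_, i5⟩
      intro x hx
      rcases i4 x hx with hq | ⟨hns, hval, hmem⟩
      · exact Or.inl hq
      · exact Or.inr ⟨List.mem_cons_of_mem _ hns, hval, hmem⟩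

theorem pv_sdiff_card (A B C : Finset (Fin 5 × Fin 5)) (hAB : A ⊆ B) (hBC : B ⊆ C) :
    (C \ A).card = (C \ B).card + (B \ A).card := by
  have hu : C \ A = (C \ B) ∪ (B \ A) := by
    ext x
    simp only [Finset.mem_sdiff, Finset.mem_union]
    constructor
    · rintro ⟨hC, hA⟩
      by_cases hB : x ∈ B
      · exact Or.inr ⟨hB, hA⟩
      · exact Or.inl ⟨hC, hB⟩
    · rintro (⟨hC, hB⟩ | ⟨hB, hA⟩)
      · exact ⟨hC, fun hx => hB (hAB hx)⟩
      · exact ⟨hBC hB, hA⟩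
  rw [hu, Finset.card_union_of_disjoint]
  exact Finset.disjoint_left.mpr fun x hx hx' =>
    (Finset.mem_sdiff.mp hx).2 (Finset.mem_sdiff.mp hx').1

-- what the `while q` loop computes: it grows V only inside the closed same-value set C,
-- counts exactly the newly marked cells, and leaves the marked part of C neighbour-closed
theorem pvBfsLoop_spec (g : Fin 5 × Fin 5 → Int) (num : Int) (C : Finset (Fin 5 × Fin 5))
    (hcl : ∀ a ∈ C, ∀ b ∈ pvNbrs a, g b = num → b ∈ C) :
    ∀ (V : Finset (Fin 5 × Fin 5)) (q : List (Fin 5 × Fin 5)) (count : Nat),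
      (∀ x ∈ q, x ∈ C ∧ x ∈ V) →
      (∀ a ∈ V, a ∈ C → a ∉ q → ∀ b ∈ pvNbrs a, g b = num → b ∈ V) →
      V ⊆ (pvBfsLoop g num V q count).1 ∧
      (pvBfsLoop g num V q count).1 \ V ⊆ C ∧
      (pvBfsLoop g num V q count).2 = count + ((pvBfsLoop g num V q count).1 \ V).card ∧
      (∀ a ∈ (pvBfsLoop g num V q count).1, a ∈ C →
        ∀ b ∈ pvNbrs a, g b = num → b ∈ (pvBfsLoop g num V q count).1) := by
  intro V q count
  induction V, q, count using pvBfsLoop.induct (g := g) (num := num) with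
  | case1 V count =>
    intro _ h2
    refine ⟨by simp [pvBfsLoop], by simp [pvBfsLoop], by simp [pvBfsLoop], ?_⟩
    intro a ha haC b hb hbv
    simpa [pvBfsLoop] using
      h2 a (by simpa [pvBfsLoop] using ha) haC (List.not_mem_nil) b hb hbv
  | case2 V count c rest r ih =>
    intro h1 h2
    obtain ⟨s1, s2, ⟨l, s3⟩, s4, s5⟩ := pvScan_spec g num (pvNbrs c) V count rest
    -- r = pvScan …; rewrite the loop one step
    have hstep : pvBfsLoop g num V (c :: rest) count = pvBfsLoop g num r.1 r.2.2 r.2.1 := by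
      conv_lhs => rw [pvBfsLoop]
    have hcC : c ∈ C := (h1 c (List.mem_cons_self)).1
    have hVr : V ⊆ r.1 := by rw [s1]; exact Finset.subset_union_left
    have hrV : r.1 \ V ⊆ C := by
      intro x hx
      obtain ⟨hx1, hx2⟩ := Finset.mem_sdiff.mp hx
      rw [s1] at hx1
      rcases Finset.mem_union.mp hx1 with h | h
      · exact absurd h hx2
      · obtain ⟨hn, hv⟩ := Finset.mem_filter.mp h
        exact hcl c hcC x (List.mem_toFinset.mp hn) hv
    have h1' : ∀ x ∈ r.2.2, x ∈ C ∧ x ∈ r.1 := by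
      intro x hx
      rcases s4 x hx with hq | ⟨hn, hv, hm⟩
      · obtain ⟨hC, hV⟩ := h1 x (List.mem_cons_of_mem _ hq)
        exact ⟨hC, hVr hV⟩
      · exact ⟨hcl c hcC x hn hv, hm⟩
    have h2' : ∀ a ∈ r.1, a ∈ C → a ∉ r.2.2 → ∀ b ∈ pvNbrs a, g b = num → b ∈ r.1 := by
      intro a ha haC haq b hb hbv
      by_cases haV : a ∈ V
      · by_cases hac : a = c
        · subst hac
          rw [s1]
          exact Finset.mem_union_right _
            (Finset.mem_filter.mpr ⟨List.mem_toFinset.mpr hb, hbv⟩)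
        · have harest : a ∉ rest := fun hr => haq (by rw [s3]; exact List.mem_append_left _ hr)
          have : a ∉ (c :: rest) := by
            intro hmem
            rcases List.mem_cons.mp hmem with h | h
            · exact hac h
            · exact harest h
          exact hVr (h2 a haV haC this b hb hbv)
      · exact absurd (s5 a ha haV) haq
    obtain ⟨c1, c2, c3, c4⟩ := ih h1' h2'
    rw [hstep]
    refine ⟨hVr.trans c1, ?_, ?_, c4⟩
    · intro x hx
      obtain ⟨hx1, hx2⟩ := Finset.mem_sdiff.mp hx
      by_cases hxr : x ∈ r.1
      · exact hrV (Finset.mem_sdiff.mpr ⟨hxr, hx2⟩)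
      · exact c2 (Finset.mem_sdiff.mpr ⟨hx1, hxr⟩)
    · have hc := pv_sdiff_card V r.1 (pvBfsLoop g num r.1 r.2.2 r.2.1).1 hVr c1
      have e1 : r.2.1 = (pvScan g num (pvNbrs c) V count rest).2.1 := rfl
      have e2 : (r.1 \ V).card = ((pvScan g num (pvNbrs c) V count rest).1 \ V).card := rfl
      omega

theorem pvStep_subset (g : Fin 5 × Fin 5 → Int) (v : Int) (S : Finset (Fin 5 × Fin 5)) :
    S ⊆ pvStep g v S := Finset.subset_union_left

theorem pv_iter_subset (g : Fin 5 × Fin 5 → Int) (v : Int) :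
    ∀ (k : Nat) (S : Finset (Fin 5 × Fin 5)), S ⊆ (pvStep g v)^[k] S := by
  intro k
  induction k with
  | zero => intro S; simp
  | succ k ih =>
    intro S x hx
    rw [Function.iterate_succ_apply']
    exact pvStep_subset g v _ (ih S hx)

theorem pvComp_self (g : Fin 5 × Fin 5 → Int) (c : Fin 5 × Fin 5) : c ∈ pvComp g c :=
  pv_iter_subset g (g c) 25 {c} (Finset.mem_singleton_self c)

theorem pvComp_val_aux (g : Fin 5 × Fin 5 → Int) (c : Fin 5 × Fin 5) :
    ∀ (k : Nat), ∀ x ∈ (pvStep g (g c))^[k] {c}, g x = g c := by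
  intro k
  induction k with
  | zero =>
    intro x hx
    have hxc : x = c := by simpa using hx
    rw [hxc]
  | succ k ih =>
    intro x hx
    rw [Function.iterate_succ_apply'] at hx
    rcases Finset.mem_union.mp hx with h | h
    · exact ih x h
    · obtain ⟨a, _, hf⟩ := Finset.mem_biUnion.mp h
      exact (Finset.mem_filter.mp hf).2

theorem pvComp_val (g : Fin 5 × Fin 5 → Int) (c : Fin 5 × Fin 5) :
    ∀ x ∈ pvComp g c, g x = g c := pvComp_val_aux g c 25

theorem pv_iter_strict (f : Finset (Fin 5 × Fin 5) → Finset (Fin 5 × Fin 5))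
    (hf : ∀ S, S ⊆ f S) (S : Finset (Fin 5 × Fin 5)) :
    ∀ n : Nat, (∀ j < n, f^[j] S ≠ f^[j + 1] S) → n ≤ (f^[n] S).card := by
  intro n
  induction n with
  | zero => intro _; exact Nat.zero_le _
  | succ n ih =>
    intro h
    have hn := ih (fun j hj => h j (Nat.lt_succ_of_lt hj))
    have hss : f^[n] S ⊂ f^[n + 1] S := by
      refine HasSubset.Subset.ssubset_of_ne ?_ (h n (Nat.lt_succ_self n))
      rw [Function.iterate_succ_apply']
      exact hf _
    have := Finset.card_lt_card hss
    omega

theorem pv_iter_fix_from (f : Finset (Fin 5 × Fin 5) → Finset (Fin 5 × Fin 5))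
    (S : Finset (Fin 5 × Fin 5)) (j : Nat) (hj : f^[j] S = f^[j + 1] S) :
    ∀ m : Nat, j ≤ m → f^[m] S = f^[j] S := by
  intro m hm
  induction m, hm using Nat.le_induction with
  | base => rfl
  | succ m hm ih =>
    calc f^[m + 1] S = f (f^[m] S) := Function.iterate_succ_apply' f m S
      _ = f (f^[j] S) := by rw [ih]
      _ = f^[j + 1] S := (Function.iterate_succ_apply' f j S).symm
      _ = f^[j] S := hj.symm

-- 25 rounds reach the fixpoint on a 25-cell board
theorem pv_fix25 (f : Finset (Fin 5 × Fin 5) → Finset (Fin 5 × Fin 5))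
    (hf : ∀ S, S ⊆ f S) (S : Finset (Fin 5 × Fin 5)) : f (f^[25] S) = f^[25] S := by
  have hex : ∃ j, j ≤ 25 ∧ f^[j] S = f^[j + 1] S := by
    by_contra hc
    push Not at hc
    have h26 := pv_iter_strict f hf S 26 (fun j hj => hc j (by omega))
    have hle : (f^[26] S).card ≤ 25 := by
      have h := Finset.card_le_univ (f^[26] S)
      simpa using h
    omega
  obtain ⟨j, hj25, hj⟩ := hex
  have h1 : f^[25] S = f^[j] S := pv_iter_fix_from f S j hj 25 hj25
  calc f (f^[25] S) = f (f^[j] S) := by rw [h1]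
    _ = f^[j + 1] S := (Function.iterate_succ_apply' f j S).symm
    _ = f^[j] S := hj.symm
    _ = f^[25] S := h1.symm

theorem pvComp_fix (g : Fin 5 × Fin 5 → Int) (c : Fin 5 × Fin 5) :
    pvStep g (g c) (pvComp g c) = pvComp g c :=
  pv_fix25 (pvStep g (g c)) (pvStep_subset g (g c)) {c}

theorem pvComp_closed (g : Fin 5 × Fin 5 → Int) (c : Fin 5 × Fin 5) :
    ∀ a ∈ pvComp g c, ∀ b ∈ pvNbrs a, g b = g c → b ∈ pvComp g c := by
  intro a ha b hb hv
  have h : b ∈ pvStep g (g c) (pvComp g c) :=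
    Finset.mem_union_right _ (Finset.mem_biUnion.mpr
      ⟨a, ha, Finset.mem_filter.mpr ⟨List.mem_toFinset.mpr hb, hv⟩⟩)
  rwa [pvComp_fix] at h

theorem pvComp_least (g : Fin 5 × Fin 5 → Int) (c : Fin 5 × Fin 5)
    (T : Finset (Fin 5 × Fin 5)) (hc : c ∈ T)
    (hT : ∀ a ∈ T, ∀ b ∈ pvNbrs a, g b = g c → b ∈ T) : pvComp g c ⊆ T := by
  have key : ∀ k : Nat, (pvStep g (g c))^[k] {c} ⊆ T := by
    intro k
    induction k with
    | zero => simpa using hc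
    | succ k ih =>
      rw [Function.iterate_succ_apply']
      intro x hx
      rcases Finset.mem_union.mp hx with h | h
      · exact ih h
      · obtain ⟨a, ha, hf⟩ := Finset.mem_biUnion.mp h
        obtain ⟨hn, hv⟩ := Finset.mem_filter.mp hf
        exact hT a (ih ha) x (List.mem_toFinset.mp hn) hv
  exact key 25

theorem pvComp_mem_symm (g : Fin 5 × Fin 5 → Int) (a b : Fin 5 × Fin 5)
    (h : b ∈ pvComp g a) : a ∈ pvComp g b := by
  have key : ∀ k : Nat, ∀ x ∈ (pvStep g (g a))^[k] {a}, a ∈ pvComp g x := by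
    intro k
    induction k with
    | zero =>
      intro x hx
      have hxa : x = a := by simpa using hx
      rw [hxa]
      exact pvComp_self g a
    | succ k ih =>
      intro x hx
      rw [Function.iterate_succ_apply'] at hx
      rcases Finset.mem_union.mp hx with hx | hx
      · exact ih x hx
      · obtain ⟨a', ha', hf⟩ := Finset.mem_biUnion.mp hx
        obtain ⟨hn, hv⟩ := Finset.mem_filter.mp hf
        have hva' : g a' = g a := pvComp_val_aux g a k a' ha'
        have ha'x : a' ∈ pvComp g x := by
          refine pvComp_closed g x x (pvComp_self g x) a' ?_ ?_
          · exact (pv_nbrs_symm a' x).mp (List.mem_toFinset.mp hn)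
          · rw [hva', hv]
        have hsub : pvComp g a' ⊆ pvComp g x := by
          refine pvComp_least g a' (pvComp g x) ha'x ?_
          intro p hp q hq hval
          exact pvComp_closed g x p hp q hq (by rw [hval, hva', hv])
        exact hsub (ih a' ha')
  exact key 25 b h

theorem pvComp_eq (g : Fin 5 × Fin 5 → Int) (a b : Fin 5 × Fin 5)
    (h : b ∈ pvComp g a) : pvComp g b = pvComp g a := by
  have hba : a ∈ pvComp g b := pvComp_mem_symm g a b h
  have hv : g b = g a := pvComp_val g a b h
  apply Finset.Subset.antisymm
  · refine pvComp_least g b (pvComp g a) h ?_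
    intro p hp q hq hval
    exact pvComp_closed g a p hp q hq (by rw [hval, hv])
  · refine pvComp_least g a (pvComp g b) hba ?_
    intro p hp q hq hval
    exact pvComp_closed g b p hp q hq (by rw [hval, hv])

set_option maxHeartbeats 1000000 in
-- the outer double loop counts every positive cell lying in a component of size ≥ 3
theorem pvOuter_spec (g : Fin 5 × Fin 5 → Int) :
    ∀ (cs : List (Fin 5 × Fin 5)) (V : Finset (Fin 5 × Fin 5)) (temp : Int),
      (∀ a ∈ V, 0 < g a ∧ pvComp g a ⊆ V) →
      (∀ a : Fin 5 × Fin 5, a ∉ V → 0 < g a → a ∈ cs) →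
      pvOuter g cs V temp =
        temp + ((Finset.univ.filter
          (fun a => a ∉ V ∧ 0 < g a ∧ 3 ≤ (pvComp g a).card)).card : Int) := by
  intro cs
  induction cs with
  | nil =>
    intro V temp _ ho2
    have hempty : Finset.univ.filter
        (fun a : Fin 5 × Fin 5 => a ∉ V ∧ 0 < g a ∧ 3 ≤ (pvComp g a).card) = ∅ := by
      refine Finset.filter_eq_empty_iff.mpr ?_
      rintro a _ ⟨haV, hpos, _⟩
      exact absurd (ho2 a haV hpos) (List.not_mem_nil)
    simp [pvOuter, hempty]
  | cons c cs ih =>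
    intro V temp ho1 ho2
    by_cases h : 0 < g c ∧ c ∉ V
    · have hdisj : ∀ x ∈ pvComp g c, x ∉ V := by
        intro x hx hxV
        have hsub := (ho1 x hxV).2
        have he := pvComp_eq g c x hx
        have hc : c ∈ pvComp g x := by rw [he]; exact pvComp_self g c
        exact h.2 (hsub hc)
      have hq1 : ∀ x ∈ ([c] : List (Fin 5 × Fin 5)), x ∈ pvComp g c ∧ x ∈ insert c V := by
        intro x hx
        have hxc : x = c := by simpa using hx
        rw [hxc]
        exact ⟨pvComp_self g c, Finset.mem_insert_self _ _⟩
      have hq2 : ∀ a ∈ insert c V, a ∈ pvComp g c → a ∉ ([c] : List (Fin 5 × Fin 5)) →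
          ∀ b ∈ pvNbrs a, g b = g c → b ∈ insert c V := by
        intro a ha haC haq b hb hbv
        have hac : a ≠ c := by simpa using haq
        rcases Finset.mem_insert.mp ha with h' | h'
        · exact absurd h' hac
        · exact absurd h' (hdisj a haC)
      obtain ⟨b1, b2, b3, b4⟩ :=
        pvBfsLoop_spec g (g c) (pvComp g c) (pvComp_closed g c) (insert c V) [c] 1 hq1 hq2
      simp only [pvOuter, if_pos h]
      generalize hLdef : pvBfsLoop g (g c) (insert c V) [c] 1 = L at b1 b2 b3 b4 ⊢
      have hL1 : L.1 = V ∪ pvComp g c := by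
        apply Finset.Subset.antisymm
        · intro x hx
          by_cases hx' : x ∈ insert c V
          · rcases Finset.mem_insert.mp hx' with h' | h'
            · rw [h']; exact Finset.mem_union_right _ (pvComp_self g c)
            · exact Finset.mem_union_left _ h'
          · exact Finset.mem_union_right _ (b2 (Finset.mem_sdiff.mpr ⟨hx, hx'⟩))
        · refine Finset.union_subset ?_ ?_
          · exact (Finset.subset_insert c V).trans b1
          · have hsub : pvComp g c ⊆ pvComp g c ∩ L.1 := by
              refine pvComp_least g c _ (Finset.mem_inter.mpr
                ⟨pvComp_self g c, b1 (Finset.mem_insert_self _ _)⟩) ?_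
              intro p hp q hq hval
              obtain ⟨hpC, hpL⟩ := Finset.mem_inter.mp hp
              exact Finset.mem_inter.mpr
                ⟨pvComp_closed g c p hpC q hq hval, b4 p hpL hpC q hq hval⟩
            exact hsub.trans Finset.inter_subset_right
      have herase : L.1 \ insert c V =
          (pvComp g c).erase c := by
        ext x
        simp only [Finset.mem_sdiff, Finset.mem_insert, Finset.mem_erase, not_or]
        constructor
        · rintro ⟨hx, hxc, hxV⟩
          rw [hL1] at hx
          rcases Finset.mem_union.mp hx with h' | h'
          · exact absurd h' hxV
          · exact ⟨hxc, h'⟩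
        · rintro ⟨hxc, hxC⟩
          exact ⟨by rw [hL1]; exact Finset.mem_union_right _ hxC, hxc, hdisj x hxC⟩
      have hcpos : 1 ≤ (pvComp g c).card := Finset.card_pos.mpr ⟨c, pvComp_self g c⟩
      have hcount : L.2 = (pvComp g c).card := by
        rw [b3, herase, Finset.card_erase_of_mem (pvComp_self g c)]
        omega
      have ho1' : ∀ a ∈ L.1,
          0 < g a ∧ pvComp g a ⊆ L.1 := by
        intro a ha
        rw [hL1] at ha ⊢
        rcases Finset.mem_union.mp ha with h' | h'
        · exact ⟨(ho1 a h').1, ((ho1 a h').2).trans Finset.subset_union_left⟩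
        · refine ⟨?_, ?_⟩
          · rw [pvComp_val g c a h']; exact h.1
          · rw [pvComp_eq g c a h']; exact Finset.subset_union_right
      have ho2' : ∀ a : Fin 5 × Fin 5, a ∉ L.1 →
          0 < g a → a ∈ cs := by
        intro a haL hpos
        have haV : a ∉ V := fun hx => haL (by rw [hL1]; exact Finset.mem_union_left _ hx)
        rcases List.mem_cons.mp (ho2 a haV hpos) with h' | h'
        · exact absurd (by rw [hL1, h']; exact Finset.mem_union_right _ (pvComp_self g c)) haL
        · exact h'
      -- split the remaining qualifying cells into those inside and outside pvComp g c
      have hunion : Finset.univ.filter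
            (fun a : Fin 5 × Fin 5 => a ∉ V ∧ 0 < g a ∧ 3 ≤ (pvComp g a).card) =
          Finset.univ.filter
            (fun a => a ∉ L.1 ∧
              0 < g a ∧ 3 ≤ (pvComp g a).card) ∪
          Finset.univ.filter
            (fun a => a ∈ pvComp g c ∧ 0 < g a ∧ 3 ≤ (pvComp g a).card) := by
        ext x
        simp only [Finset.mem_filter, Finset.mem_union, Finset.mem_univ, true_and, hL1,
          Finset.mem_union, not_or]
        constructor
        · rintro ⟨hxV, hP⟩
          by_cases hxC : x ∈ pvComp g c
          · exact Or.inr ⟨hxC, hP⟩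
          · exact Or.inl ⟨⟨hxV, hxC⟩, hP⟩
        · rintro (⟨⟨hxV, _⟩, hP⟩ | ⟨hxC, hP⟩)
          · exact ⟨hxV, hP⟩
          · exact ⟨hdisj x hxC, hP⟩
      have hdisj2 : Disjoint
          (Finset.univ.filter
            (fun a : Fin 5 × Fin 5 => a ∉ L.1 ∧
              0 < g a ∧ 3 ≤ (pvComp g a).card))
          (Finset.univ.filter
            (fun a : Fin 5 × Fin 5 => a ∈ pvComp g c ∧ 0 < g a ∧ 3 ≤ (pvComp g a).card)) := by
        refine Finset.disjoint_left.mpr ?_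
        intro x hx hx'
        have h1 := (Finset.mem_filter.mp hx).2.1
        have h2 := (Finset.mem_filter.mp hx').2.1
        exact h1 (by rw [hL1]; exact Finset.mem_union_right _ h2)
      have hFC : Finset.univ.filter
            (fun a : Fin 5 × Fin 5 => a ∈ pvComp g c ∧ 0 < g a ∧ 3 ≤ (pvComp g a).card) =
          if 3 ≤ (pvComp g c).card then pvComp g c else ∅ := by
        split_ifs with h3
        · ext x
          simp only [Finset.mem_filter, Finset.mem_univ, true_and]
          constructor
          · exact fun hx => hx.1
          · intro hx
            refine ⟨hx, ?_, ?_⟩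
            · rw [pvComp_val g c x hx]; exact h.1
            · rw [pvComp_eq g c x hx]; exact h3
        · ext x
          simp only [Finset.mem_filter, Finset.mem_univ, true_and, Finset.notMem_empty,
            iff_false, not_and]
          intro hx _ h3'
          rw [pvComp_eq g c x hx] at h3'
          exact h3 h3'
      have hcards : (Finset.univ.filter
            (fun a : Fin 5 × Fin 5 => a ∉ V ∧ 0 < g a ∧ 3 ≤ (pvComp g a).card)).card =
          (Finset.univ.filter
            (fun a : Fin 5 × Fin 5 => a ∉ L.1 ∧
              0 < g a ∧ 3 ≤ (pvComp g a).card)).card +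
          (if 3 ≤ (pvComp g c).card then (pvComp g c).card else 0) := by
        rw [hunion, Finset.card_union_of_disjoint hdisj2, hFC]
        split_ifs <;> simp
      rw [ih _ _ ho1' ho2', hcount, hcards]
      split_ifs with h3 <;> push_cast <;> ring
    · simp only [pvOuter, if_neg h]
      have ho2' : ∀ a : Fin 5 × Fin 5, a ∉ V → 0 < g a → a ∈ cs := by
        intro a haV hpos
        rcases List.mem_cons.mp (ho2 a haV hpos) with h' | h'
        · subst h'
          exact absurd ⟨hpos, haV⟩ h
        · exact h'
      exact ih V temp ho1 ho2'

-- A's result in closed form: the number of positive cells in components of size ≥ 3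
theorem pv_bfs_closed (rotated : List (List Int)) :
    bfs rotated = ((Finset.univ.filter (fun a : Fin 5 × Fin 5 =>
      0 < pvGrid rotated a ∧ 3 ≤ (pvComp (pvGrid rotated) a).card)).card : Int) := by
  have h := pvOuter_spec (pvGrid rotated) pvCells ∅ 0
    (by intro a ha; exact absurd ha (Finset.notMem_empty a))
    (fun a _ _ => pv_mem_cells a)
  have hfc : Finset.univ.filter (fun a : Fin 5 × Fin 5 =>
        a ∉ (∅ : Finset (Fin 5 × Fin 5)) ∧
          0 < pvGrid rotated a ∧ 3 ≤ (pvComp (pvGrid rotated) a).card) =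
      Finset.univ.filter (fun a : Fin 5 × Fin 5 =>
        0 < pvGrid rotated a ∧ 3 ≤ (pvComp (pvGrid rotated) a).card) := by
    apply Finset.filter_congr
    intro x _
    simp
  unfold bfs
  rw [h, hfc, zero_add]

-- B's result in the same closed form
theorem pv_alt_closed (rotated : List (List Int)) :
    bfs_alt rotated = ((Finset.univ.filter (fun a : Fin 5 × Fin 5 =>
      0 < pvGrid rotated a ∧ 3 ≤ (pvComp (pvGrid rotated) a).card)).card : Int) := by
  unfold bfs_alt
  congr 1

-- ===== VERDICT (by name: the statement is the Claim_ definition above) =====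
theorem bfs_spec : Claim_equal_bfs := by
  intro rotated _ _
  unfold Spec_bfs
  rw [pv_bfs_closed, pv_alt_closed]
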